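-- pv_equiv track=rewrite | github.com/brenonf/Beecrowd-URI-Solutions | Python/2126.py | qtd
-- ===== SOURCE A (Python) =====
-- def qtd(n1,n2):
--     cont = 0
--     ind = 0
--     len1 = len(n1)
--     len2 = len(n2)
--     for i in range(len2):
--         if n2[i] == n1[0] and n1 == n2[i:i + len1]:
--             cont += 1
--             ind = i + 1
--     return cont, ind
-- ===== SOURCE B (Python) =====
-- def qtd(n1, n2):
--     # chain of str.find calls: jump from match to match instead of testing every index
--     cont = 0
--     ind = 0
--     pos = n2.find(n1)
--     while pos != -1:
--         cont += 1
--         ind = pos + 1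
--         pos = n2.find(n1, pos + 1)
--     return cont, ind
-- ===== Notes on version B (the rewrite author's own statement) =====
-- stated objective: faster
-- what changed: A tests every index of n2 and builds a slice comparison there; B jumps from occurrence to occurrence with a chain of str.find(sub, start) calls, counting matches and recording the last one.
-- outside the precondition, e.g. on qtd('', ''): A returns (0, 0), B returns (1, 1)
import Mathlib
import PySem

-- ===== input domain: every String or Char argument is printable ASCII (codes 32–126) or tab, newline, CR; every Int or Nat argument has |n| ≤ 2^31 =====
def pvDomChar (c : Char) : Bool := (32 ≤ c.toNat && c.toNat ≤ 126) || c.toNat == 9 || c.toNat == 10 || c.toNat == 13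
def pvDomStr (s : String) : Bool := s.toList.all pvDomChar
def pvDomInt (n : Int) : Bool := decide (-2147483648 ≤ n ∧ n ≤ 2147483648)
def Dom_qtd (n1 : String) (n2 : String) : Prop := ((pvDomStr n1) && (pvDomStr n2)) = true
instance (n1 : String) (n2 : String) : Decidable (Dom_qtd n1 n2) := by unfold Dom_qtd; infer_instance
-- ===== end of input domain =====

-- B replaces A's per-index scan-and-slice loop by a chain of str.find calls that jumps
-- from one occurrence to the next (objective: faster in CPython, C-level substring search).
-- A mutates nothing; equivalence is about the return value.

-- ===== PORT A =====
def qtd (n1 : String) (n2 : String) : Int × Int :=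
  let s1 := n1.toList
  let s2 := n2.toList
  let len1 : Int := s1.length
  let len2 : Int := s2.length
  (PySem.List.pyRange 0 len2 1).foldl
    (fun (st : Int × Int) (i : Int) =>
      if PySem.List.pyGet? s2 i = PySem.List.pyGet? s1 0 ∧
          s1 = PySem.List.slice s2 (some i) (some (i + len1))
      then (st.1 + 1, i + 1) else st)
    (0, 0)

-- ===== PORT B =====
-- bounds of a successful find: needed by the loop's termination proof (cited in decreasing_by)
theorem pvFindFromBounds (s sub : List Char) (start : Int)
    (h : PySem.Chars.findFrom s sub start none ≠ -1) :
    0 ≤ PySem.Chars.findFrom s sub start none ∧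
      PySem.Chars.findFrom s sub start none ≤ (s.length : Int) ∧
      (0 ≤ start → start ≤ PySem.Chars.findFrom s sub start none) := by
  unfold PySem.Chars.findFrom at h ⊢
  simp only [] at h ⊢
  by_cases hs : start < 0
  case neg =>
    rw [if_neg hs] at h ⊢
    have hf := PySem.Chars.neg_one_le_find
        (List.drop start.toNat (List.take ((s.length : Int)).toNat s)) sub
    have hl := PySem.Chars.find_le_length
        (List.drop start.toNat (List.take ((s.length : Int)).toNat s)) sub
    simp only [List.length_drop, List.length_take] at hl
    split_ifs at h ⊢ <;> push_cast at * <;> omega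
  case pos =>
    rw [if_pos hs] at h ⊢
    by_cases h2 : start + (s.length : Int) < 0
    case neg =>
      rw [if_neg h2] at h ⊢
      have hf := PySem.Chars.neg_one_le_find
          (List.drop (start + (s.length : Int)).toNat (List.take ((s.length : Int)).toNat s)) sub
      have hl := PySem.Chars.find_le_length
          (List.drop (start + (s.length : Int)).toNat (List.take ((s.length : Int)).toNat s)) sub
      simp only [List.length_drop, List.length_take] at hl
      split_ifs at h ⊢ <;> push_cast at * <;> omega

    case pos =>
      rw [if_pos h2] at h ⊢
      have hf := PySem.Chars.neg_one_le_find
          (List.drop (0 : Int).toNat (List.take ((s.length : Int)).toNat s)) sub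
      have hl := PySem.Chars.find_le_length
          (List.drop (0 : Int).toNat (List.take ((s.length : Int)).toNat s)) sub
      simp only [List.length_drop, List.length_take] at hl
      split_ifs at h ⊢ <;> push_cast at * <;> omega

-- the while-loop of Source B: state (cont, ind, pos); pos = -1 exits
def qtdAltGo (s2 s1 : List Char) (cont ind pos : Int) : Int × Int :=
  if h : pos = -1 then (cont, ind)
  else qtdAltGo s2 s1 (cont + 1) (pos + 1) (PySem.Chars.findFrom s2 s1 (pos + 1) none)
termination_by if pos = -1 then 0 else ((s2.length : Int) + 2 - pos).toNat + 1
decreasing_by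
  by_cases hq : PySem.Chars.findFrom s2 s1 (pos + 1) none = -1
  · simp [hq, h]
  · obtain ⟨hb1, hb2, hb3⟩ := pvFindFromBounds s2 s1 (pos + 1) hq
    rw [if_neg hq, if_neg h]
    by_cases hp : (0 : Int) ≤ pos + 1
    · have := hb3 hp; omega
    · omega

def qtd_alt (n1 : String) (n2 : String) : Int × Int :=
  qtdAltGo n2.toList n1.toList 0 0 (PySem.Chars.find n2.toList n1.toList)

-- ===== PRECONDITION & SPEC =====
-- Pre_ excludes only empty n1, on which A evaluates n1[0]: it raises IndexError whenever
-- n2 is nonempty, and on ("","") returns an accidental (0,0) where counting "" in "" is anybody's corner.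
def Pre_qtd (n1 : String) (n2 : String) : Prop := n1.toList ≠ []
instance (n1 : String) (n2 : String) : Decidable (Pre_qtd n1 n2) := by unfold Pre_qtd; infer_instance
def pvWitness_qtd : String × String := ("ab", "ababab")

def Spec_qtd (n1 : String) (n2 : String) (out : Int × Int) : Prop := out = qtd_alt n1 n2
instance (n1 : String) (n2 : String) (out : Int × Int) : Decidable (Spec_qtd n1 n2 out) := by unfold Spec_qtd; infer_instance

-- ===== CLAIM (what is proved, stated in full; the proofs are below) =====
def Claim_equal_qtd : Prop := ∀ (n1 : String) (n2 : String), Dom_qtd n1 n2 → Pre_qtd n1 n2 → Spec_qtd n1 n2 (qtd n1 n2)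

-- ===== LEMMAS AND PROOFS =====

-- the common step: at index k, bump the count and record k+1 iff n1 matches at k
def stepN (s2 s1 : List Char) (st : Int × Int) (k : Nat) : Int × Int :=
  if s1 <+: s2.drop k then (st.1 + 1, (k : Int) + 1) else st

theorem stepA_eq_stepN (s2 s1 : List Char) (h1 : s1 ≠ []) (k : Nat) (st : Int × Int) :
    (if PySem.List.pyGet? s2 (k : Int) = PySem.List.pyGet? s1 0 ∧
        s1 = PySem.List.slice s2 (some (k : Int)) (some ((k : Int) + (s1.length : Int)))
      then (st.1 + 1, (k : Int) + 1) else st) = stepN s2 s1 st k := by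
  unfold stepN
  rw [PySem.List.slice_natCast_add]
  by_cases hp : s1 <+: s2.drop k
  · have heq : s1 = (s2.drop k).take s1.length := List.prefix_iff_eq_take.mp hp
    have hg : PySem.List.pyGet? s2 (k : Int) = PySem.List.pyGet? s1 0 := by
      obtain ⟨t, ht⟩ := hp
      have h0 : 0 < s1.length := List.length_pos_iff.mpr h1
      simp only [PySem.List.pyGet?_natCast, PySem.List.pyGet?_zero]
      rw [show s2[k]? = (s2.drop k)[0]? by simp [List.getElem?_drop], ← ht,
        List.getElem?_append_left h0]
    simp [hp, hg, ← heq]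
  · have : ¬ s1 = (s2.drop k).take s1.length := fun h => hp (List.prefix_iff_eq_take.mpr h)
    simp [hp, this]

theorem fold_no_match (s2 s1 : List Char) (l : List Nat) (st : Int × Int)
    (h : ∀ k ∈ l, ¬ s1 <+: s2.drop k) : l.foldl (stepN s2 s1) st = st := by
  induction l generalizing st with
  | nil => rfl
  | cons a l ih =>
      simp only [List.foldl_cons, stepN, if_neg (h a (by simp))]
      exact ih st (fun k hk => h k (by simp [hk]))

theorem loop_eq (s2 s1 : List Char) (h1 : s1 ≠ []) :
    ∀ fuel pos, pos ≤ s2.length → s2.length - pos ≤ fuel → ∀ c i,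
      (List.range' pos (s2.length - pos)).foldl (stepN s2 s1) (c, i) =
        qtdAltGo s2 s1 c i (PySem.Chars.findFrom s2 s1 (pos : Int) none) := by
  intro fuel
  induction fuel with
  | zero =>
      intro pos hpos hf c i
      have hn : pos = s2.length := by omega
      subst hn
      have hm1 : PySem.Chars.findFrom s2 s1 (s2.length : Int) none = -1 := by
        rw [PySem.Chars.findFrom_natCast_eq_neg_one_iff s2 s1 s2.length le_rfl]
        simp [List.drop_length, h1]
      rw [hm1, qtdAltGo]
      simp
  | succ fuel ih =>
      intro pos hpos hf c i
      by_cases hm : PySem.Chars.findFrom s2 s1 (pos : Int) none = -1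
      · rw [hm, qtdAltGo]
        simp only [reduceDIte]
        apply fold_no_match
        intro k hk hpre
        rw [PySem.Chars.findFrom_natCast_eq_neg_one_iff s2 s1 pos hpos] at hm
        apply hm
        have hk' := (List.mem_range'_1).mp hk
        have hdk : s2.drop k = (s2.drop pos).drop (k - pos) := by
          rw [List.drop_drop]; congr 1; omega
        rw [hdk] at hpre
        exact hpre.isInfix.trans (List.drop_suffix _ _).isInfix
      · obtain ⟨hge, hpre, hmin⟩ := PySem.Chars.findFrom_natCast_spec s2 s1 pos hpos hm
        set q : Int := PySem.Chars.findFrom s2 s1 (pos : Int) none with hqdef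
        have hq0 : (0 : Int) ≤ q := le_trans (by positivity) hge
        have hq : q = (q.toNat : Int) := by omega
        have hqlt : q.toNat < s2.length := by
          by_contra hc
          have hnil : s2.drop q.toNat = [] := List.drop_eq_nil_of_le (by omega)
          rw [hnil, List.prefix_nil] at hpre
          exact h1 hpre
        have hple : pos ≤ q.toNat := by omega
        -- split the index range at the match position q.toNat
        have hsplit : List.range' pos (s2.length - pos) =
            List.range' pos (q.toNat - pos) ++
              q.toNat :: List.range' (q.toNat + 1) (s2.length - (q.toNat + 1)) := by
          have hr : q.toNat :: List.range' (q.toNat + 1) (s2.length - (q.toNat + 1)) =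
              List.range' q.toNat (s2.length - q.toNat) := by
            rw [show s2.length - q.toNat = (s2.length - (q.toNat + 1)) + 1 by omega,
              List.range'_succ]
          rw [hr]
          have happ := @List.range'_append pos (q.toNat - pos) (s2.length - q.toNat) 1
          rw [show pos + 1 * (q.toNat - pos) = q.toNat by omega,
            show (q.toNat - pos) + (s2.length - q.toNat) = s2.length - pos by omega] at happ
          exact happ.symm
        rw [hsplit, List.foldl_append,
          fold_no_match s2 s1 (List.range' pos (q.toNat - pos)) (c, i) (by
            intro k hk
            have hk' := (List.mem_range'_1).mp hk
            exact hmin k hk'.1 (by omega))]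
        simp only [List.foldl_cons, stepN, if_pos hpre]
        rw [ih (q.toNat + 1) (by omega) (by omega) (c + 1) ((q.toNat : Int) + 1)]
        conv_rhs => rw [qtdAltGo]
        rw [dif_neg hm, hq]
        push_cast
        rfl

-- ===== VERDICT (by name: the statement is the Claim_ definition above) =====
theorem qtd_spec : Claim_equal_qtd := by
  intro n1 n2 _ hpre
  unfold Spec_qtd qtd qtd_alt
  have h1 : n1.toList ≠ [] := hpre
  simp only []
  rw [PySem.List.pyRange_one 0 ((n2.toList.length : Int))]
  simp only [Int.sub_zero, Int.toNat_natCast, List.foldl_map, zero_add]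
  rw [PySem.List.foldl_congr_mem (List.range n2.toList.length) _
    (stepN n2.toList n1.toList) (0, 0)
    (fun acc k _ => stepA_eq_stepN n2.toList n1.toList h1 k acc)]
  rw [List.range_eq_range']
  have hl := loop_eq n2.toList n1.toList h1 n2.toList.length 0 (Nat.zero_le _) (by omega) 0 0
  simp only [Nat.sub_zero, Nat.cast_zero] at hl
  rw [hl, PySem.Chars.findFrom_zero]
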